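-- pv_equiv track=rewrite | github.com/KeshavR77/youth-homelessness-chatbot | test.py | function
-- ===== SOURCE A (Python) =====
-- def function( password = "" ):
--     if len(password) < 2:
--         return 0
--
--     vowels = set( ['a', 'e', 'i', 'o', 'u'] )
--     password = password.lower()
--     if password[0] in vowels:
--         return 1 + function( password[ 1 : : 2 ] )
--
--     return function( password[ 1 : ] ) + len( password[ 2 : 5 ] )
-- ===== SOURCE B (Python) =====
-- def function(password=""):
--     # One pass over an implicit (start, step, length) view of the lowered
--     # string: index arithmetic instead of materialised slices.
--     s = password.lower()
--     vowels = {'a', 'e', 'i', 'o', 'u'}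
--     start, step, m = 0, 1, len(s)
--     total = 0
--     while m >= 2:
--         if s[start] in vowels:
--             total += 1
--             start += step
--             step *= 2
--             m //= 2
--         else:
--             total += min(3, m - 2)
--             start += step
--             m -= 1
--     return total
-- ===== Notes on version B (the rewrite author's own statement) =====
-- stated objective: alternative
-- what changed: Replaces A's recursion that materialises a new sliced string at every step with a single iterative loop over an implicit (start, step, length) arithmetic view of the lowered string, computing the slice lengths arithmetically; it trades slice copies for index arithmetic.
import Mathlib
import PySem

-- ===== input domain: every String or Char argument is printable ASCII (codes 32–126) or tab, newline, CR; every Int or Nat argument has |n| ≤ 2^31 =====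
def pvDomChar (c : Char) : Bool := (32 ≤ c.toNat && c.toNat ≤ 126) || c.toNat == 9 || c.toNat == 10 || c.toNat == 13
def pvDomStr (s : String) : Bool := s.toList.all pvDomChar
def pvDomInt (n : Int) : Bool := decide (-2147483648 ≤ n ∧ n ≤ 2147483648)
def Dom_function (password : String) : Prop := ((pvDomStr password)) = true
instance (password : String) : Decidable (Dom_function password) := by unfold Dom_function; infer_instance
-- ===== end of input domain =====

-- B replaces A's recursion on freshly copied slices by one loop over a (start, step, length)
-- arithmetic view of the lowered string (an alternative traversal; same value everywhere).


-- ===== PORT A =====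
-- set(['a','e','i','o','u'])
def pvVowels : PySem.Set Char := PySem.Set.ofList ['a', 'e', 'i', 'o', 'u']

-- transliteration of A (recursion on the character list of the string; the extra fuel
-- argument, always ≥ the list length, only makes the recursion structural: the branch at
-- fuel 0 returns what the len < 2 test would, since the length then is 0)
def pvFunA : Nat → List Char → Int
  | 0, _ => 0
  | fuel + 1, l =>
    if l.length < 2 then 0
    else
      let p := PySem.Chars.lower l
      if PySem.List.pyGetD p 0 ' ' ∈ pvVowels then
        1 + pvFunA fuel ((PySem.List.slice? p (some 1) none 2).getD [])
      else
        pvFunA fuel (PySem.List.slice p (some 1) none) + ((PySem.List.slice p (some 2) (some 5)).length : Int)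

def function (password : String) : Int := pvFunA password.toList.length password.toList

-- ===== PORT B =====
-- the while loop of Source B: (start, step, m) is the current view, total the accumulator
-- (fuel, always ≥ m, only makes the loop structural: at fuel 0, m = 0 < 2 and the loop stops)
def pvFunB (s : List Char) : Nat → Nat → Nat → Nat → Int → Int
  | 0, _, _, _, total => total
  | fuel + 1, start, step, m, total =>
    if m < 2 then total
    else if PySem.List.pyGetD s (start : Int) ' ' ∈ pvVowels then
      pvFunB s fuel (start + step) (step * 2) (m / 2) (total + 1)
    else
      pvFunB s fuel (start + step) step (m - 1) (total + min 3 ((m : Int) - 2))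

def function_alt (password : String) : Int :=
  let s := PySem.Chars.lower password.toList
  pvFunB s s.length 0 1 s.length 0

-- ===== PRECONDITION & SPEC =====
def Spec_function (password : String) (out : Int) : Prop := out = function_alt password
instance (password : String) (out : Int) : Decidable (Spec_function password out) := by unfold Spec_function; infer_instance

-- ===== CLAIM (what is proved, stated in full; the proofs are below) =====
def Claim_equal_function : Prop := ∀ (password : String), Dom_function password → Spec_function password (function password)

-- ===== LEMMAS AND PROOFS =====

-- every-second element starting at index 1 (what p[1::2] extracts)
def pvOdds {α : Type} : List α → List α
  | [] => []
  | [_] => []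
  | _ :: b :: t => b :: pvOdds t

theorem pvOdds_length {α : Type} : ∀ (l : List α), (pvOdds l).length = l.length / 2
  | [] => by simp [pvOdds]
  | [_] => by simp [pvOdds]
  | _ :: _ :: t => by simp [pvOdds, pvOdds_length t]; omega

theorem pvOdds_filterMap : ∀ (l : List Char),
    List.filterMap (fun k : Nat => l[2 * k + 1]?) (List.range (l.length / 2)) = pvOdds l
  | [] => by simp [pvOdds]
  | [_] => by simp [pvOdds]
  | a :: b :: t => by
    have ih := pvOdds_filterMap t
    have h2 : (a :: b :: t).length / 2 = t.length / 2 + 1 := by simp; omega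
    rw [h2, List.range_succ_eq_map, List.filterMap_cons, List.filterMap_map]
    have hf : ((fun k : Nat => (a :: b :: t)[2 * k + 1]?) ∘ Nat.succ) = fun k : Nat => t[2 * k + 1]? := by
      funext k
      simp only [Function.comp_apply]
      have h3 : 2 * k.succ = 2 * k + 1 + 1 := by omega
      rw [h3]
      exact List.getElem?_cons_succ
    rw [hf, ih]
    simp [pvOdds]

-- p[1::2] is exactly pvOdds p
theorem pvSlice_odds (p : List Char) :
    PySem.List.slice? p (some 1) none 2 = some (pvOdds p) := by
  cases p with
  | nil => rfl
  | cons a t =>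
    simp only [PySem.List.slice?, PySem.List.sliceIndices]
    norm_num
    by_cases h0 : t.length = 0
    · obtain rfl : t = [] := List.length_eq_zero_iff.mp h0
      simp [pvOdds]
    · rw [if_pos (by omega : 0 < t.length)]
      have hc : (((t.length : Int) + 2 - 1) / 2).toNat = (a :: t).length / 2 := by
        simp only [List.length_cons]
        omega
      rw [hc]
      have hf : (fun x : Nat => (a :: t)[((1 : Int) + 2 * (x : Int)).toNat]?) =
          fun x : Nat => (a :: t)[2 * x + 1]? := by
        funext x; congr 1; omega
      rw [hf, pvOdds_filterMap]

-- lowering is idempotent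
theorem pvLowerChar_idem (c : Char) :
    PySem.Chars.lowerChar (PySem.Chars.lowerChar c) = PySem.Chars.lowerChar c := by
  simp only [PySem.Chars.lowerChar, PySem.Chars.isupper]
  split_ifs with h1 h2 <;> try rfl
  exfalso
  simp only [Bool.and_eq_true, decide_eq_true_eq] at h1 h2
  have hZ : c.toNat ≤ 90 := by
    have h := h1.2; rw [Char.le_def, UInt32.le_iff_toNat_le] at h; exact h
  have hofNat : (Char.ofNat (c.toNat + 32)).toNat = c.toNat + 32 := by
    rw [Char.toNat_ofNat, if_pos (Or.inl (by omega : c.toNat + 32 < 55296))]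
  have h2' : (Char.ofNat (c.toNat + 32)).toNat ≤ 90 := by
    have h := h2.2; rw [Char.le_def, UInt32.le_iff_toNat_le] at h; exact h
  rw [hofNat] at h2'
  have hA : 65 ≤ c.toNat := by
    have h := h1.1; rw [Char.le_def, UInt32.le_iff_toNat_le] at h; exact h
  omega

theorem pvLower_idem (l : List Char) :
    PySem.Chars.lower (PySem.Chars.lower l) = PySem.Chars.lower l := by
  simp [PySem.Chars.lower, pvLowerChar_idem]

theorem pvOdds_map {α β : Type} (f : α → β) : ∀ (l : List α), pvOdds (l.map f) = (pvOdds l).map f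
  | [] => rfl
  | [_] => rfl
  | _ :: _ :: t => by simp [pvOdds, pvOdds_map f t]

-- the common recursion both programs compute, on an already-lowered list
def pvG (p : List Char) : Int :=
  if p.length < 2 then 0
  else if p.headD ' ' ∈ pvVowels then 1 + pvG (pvOdds p)
  else pvG p.tail + min 3 ((p.length : Int) - 2)
termination_by p.length
decreasing_by
  · rw [pvOdds_length]; omega
  · simp only [List.length_tail]; omega

theorem pvGetD_zero (l : List Char) (d : Char) : PySem.List.pyGetD l 0 d = l.headD d := by
  cases l <;> simp [PySem.List.pyGetD, PySem.List.pyGet?, PySem.List.pyIdx?]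

-- A computes pvG of the lowered list
theorem pvLower_length (l : List Char) : (PySem.Chars.lower l).length = l.length := by
  simp [PySem.Chars.lower]

theorem pvLower_tail (l : List Char) :
    PySem.Chars.lower l.tail = (PySem.Chars.lower l).tail := by
  simp [PySem.Chars.lower, List.map_tail]

theorem pvLower_odds (l : List Char) :
    PySem.Chars.lower (pvOdds l) = pvOdds (PySem.Chars.lower l) := by
  simp [PySem.Chars.lower, pvOdds_map]

theorem pvA_eq : ∀ (fuel : Nat) (l : List Char), l.length ≤ fuel →
    pvFunA fuel l = pvG (PySem.Chars.lower l) := by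
  intro fuel
  induction fuel with
  | zero =>
    intro l hl
    rw [pvFunA, pvG]
    rw [if_pos (by rw [pvLower_length]; omega)]
  | succ fuel ih =>
    intro l hl
    rw [pvFunA, pvG]
    have hp : (PySem.Chars.lower l).length = l.length := pvLower_length l
    by_cases h : l.length < 2
    · rw [if_pos h, if_pos (by omega : (PySem.Chars.lower l).length < 2)]
    · rw [if_neg h, if_neg (by omega : ¬ (PySem.Chars.lower l).length < 2)]
      simp only [pvGetD_zero]
      by_cases hv : (PySem.Chars.lower l).headD ' ' ∈ pvVowels
      · rw [if_pos hv, if_pos hv, pvSlice_odds, Option.getD_some]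
        rw [ih _ (by rw [pvOdds_length, hp]; omega)]
        rw [pvLower_odds, pvLower_idem]
      · rw [if_neg hv, if_neg hv, PySem.List.slice_from_one]
        rw [ih _ (by simp only [List.length_tail, hp]; omega)]
        rw [pvLower_tail, pvLower_idem]
        congr 1
        -- length of p[2:5] is min 3 (len - 2) for len ≥ 2
        rw [PySem.List.slice_toNat _ (by norm_num) (by norm_num)]
        simp only [List.length_take, List.length_drop, hp]
        omega

-- the materialised view of (s, start, step, m)
def pvView (s : List Char) : Nat → Nat → Nat → List Char
  | _, _, 0 => []
  | start, step, m + 1 => PySem.List.pyGetD s (start : Int) ' ' :: pvView s (start + step) step m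

theorem pvView_length (s : List Char) : ∀ (start step m : Nat), (pvView s start step m).length = m := by
  intro start step m
  induction m generalizing start with
  | zero => rfl
  | succ m ih => simp [pvView, ih]

theorem pvView_odds (s : List Char) : ∀ (m start step : Nat),
    pvOdds (pvView s start step m) = pvView s (start + step) (step * 2) (m / 2)
  | 0, start, step => by simp [pvView, pvOdds]
  | 1, start, step => by simp [pvView, pvOdds]
  | (m + 2), start, step => by
    have ih := pvView_odds s m (start + step + step) step
    have h2 : (m + 2) / 2 = m / 2 + 1 := by omega
    rw [h2]
    show pvOdds (_ :: _ :: pvView s (start + step + step) step m) =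
      PySem.List.pyGetD s ((start + step : Nat) : Int) ' ' ::
        pvView s (start + step + step * 2) (step * 2) (m / 2)
    rw [pvOdds, ih]
    have : start + step + step + step = start + step + step * 2 := by omega
    rw [this]

-- B's loop computes pvG of the view
theorem pvB_eq (s : List Char) : ∀ (fuel m start step : Nat) (total : Int), m ≤ fuel →
    pvFunB s fuel start step m total = total + pvG (pvView s start step m) := by
  intro fuel
  induction fuel with
  | zero =>
    intro m start step total hm
    obtain rfl : m = 0 := by omega
    rw [pvFunB, pvG, pvView_length]
    norm_num
  | succ fuel ih =>
    intro m start step total hm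
    rw [pvFunB, pvG, pvView_length s start step m]
    by_cases h : m < 2
    · simp [h]
    · obtain ⟨k, rfl⟩ : ∃ k, m = k + 2 := ⟨m - 2, by omega⟩
      have hhead : (pvView s start step (k + 2)).headD ' ' = PySem.List.pyGetD s (start : Int) ' ' := by
        simp [pvView]
      simp only [if_neg h, hhead]
      by_cases hv : PySem.List.pyGetD s (start : Int) ' ' ∈ pvVowels
      · rw [if_pos hv, if_pos hv, ih ((k + 2) / 2) _ _ _ (by omega), pvView_odds]
        ring
      · rw [if_neg hv, if_neg hv, show k + 2 - 1 = k + 1 by omega, ih (k + 1) _ _ _ (by omega)]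
        have htail : (pvView s start step (k + 2)).tail = pvView s (start + step) step (k + 1) := by
          simp [pvView]
        rw [htail]
        ring

theorem pvView_drop (s : List Char) : ∀ (m k : Nat), k + m = s.length → pvView s k 1 m = s.drop k := by
  intro m
  induction m with
  | zero => intro k hk; rw [pvView, List.drop_of_length_le (by omega)]
  | succ m ih =>
    intro k hk
    rw [pvView, ih (k + 1) (by omega), PySem.List.pyGetD_natCast,
      List.drop_eq_getElem_cons (by omega : k < s.length)]
    rw [List.getD_eq_getElem _ _ (by omega : k < s.length)]

theorem pvView_all (s : List Char) : pvView s 0 1 s.length = s := by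
  rw [pvView_drop s s.length 0 (by omega), List.drop_zero]

-- ===== VERDICT (by name: the statement is the Claim_ definition above) =====
theorem function_spec : Claim_equal_function := by
  intro password _
  unfold Spec_function function function_alt
  rw [pvA_eq _ _ (le_refl _), pvB_eq _ _ _ _ _ _ (le_refl _), pvView_all, zero_add]
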